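-- pv_equiv track=rewrite | github.com/jjoshua2/arc_agi | dupes/multi_group-110/train_only/913.py | get_neighbors_8
-- ===== SOURCE A (Python) =====
-- def get_neighbors_8(r, c, h, w):
--     dirs = [(-1, -1), (-1, 0), (-1, 1), (0, -1), (0, 1), (1, -1), (1, 0), (1, 1)]
--     res = []
--     for dr, dc in dirs:
--         nr, nc = r + dr, c + dc
--         if 0 <= nr < h and 0 <= nc < w:
--             res.append((nr, nc))
--     return res
-- ===== SOURCE B (Python) =====
-- def get_neighbors_8(r, c, h, w):
--     res = []
--     for nr in range(max(0, r - 1), min(h - 1, r + 1) + 1):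
--         for nc in range(max(0, c - 1), min(w - 1, c + 1) + 1):
--             if (nr, nc) != (r, c):
--                 res.append((nr, nc))
--     return res
-- ===== Notes on version B (the rewrite author's own statement) =====
-- stated objective: alternative
-- what changed: B clamps the neighborhood to the grid once (rlo=max(0,r-1)..rhi=min(h-1,r+1), same for columns) and iterates only that in-bounds rectangle with range(), skipping the center, instead of filtering the 8 fixed offsets with a per-cell bounds check.
import Mathlib
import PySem

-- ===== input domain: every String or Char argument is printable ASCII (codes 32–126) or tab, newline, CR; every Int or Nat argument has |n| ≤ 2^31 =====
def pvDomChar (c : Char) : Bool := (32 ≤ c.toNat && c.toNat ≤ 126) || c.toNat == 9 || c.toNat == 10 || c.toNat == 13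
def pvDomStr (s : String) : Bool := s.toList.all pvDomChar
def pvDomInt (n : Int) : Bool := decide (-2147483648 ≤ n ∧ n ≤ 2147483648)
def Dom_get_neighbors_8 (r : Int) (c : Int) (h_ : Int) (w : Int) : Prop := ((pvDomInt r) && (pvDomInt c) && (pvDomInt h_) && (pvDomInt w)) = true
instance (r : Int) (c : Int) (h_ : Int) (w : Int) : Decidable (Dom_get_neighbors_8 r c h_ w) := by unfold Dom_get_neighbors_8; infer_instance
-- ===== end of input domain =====

-- B clamps the neighborhood rectangle to the grid once (max/min on the row/column bounds) and iterates only that rectangle with range(), skipping the center, instead of filtering the 8 fixed offsets; alternative decomposition, same cost.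


-- ===== PORT A =====
def get_neighbors_8 (r : Int) (c : Int) (h_ : Int) (w : Int) : List (Int × Int) :=
  let dirs : List (Int × Int) := [(-1, -1), (-1, 0), (-1, 1), (0, -1), (0, 1), (1, -1), (1, 0), (1, 1)]
  dirs.foldl (fun res d =>
    let nr := r + d.1
    let nc := c + d.2
    if (0 ≤ nr ∧ nr < h_) ∧ (0 ≤ nc ∧ nc < w) then res ++ [(nr, nc)] else res) []

-- ===== PORT B =====
def get_neighbors_8_alt (r : Int) (c : Int) (h_ : Int) (w : Int) : List (Int × Int) :=
  (PySem.List.pyRange (max 0 (r - 1)) (min (h_ - 1) (r + 1) + 1) 1).foldl (fun res nr =>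
    (PySem.List.pyRange (max 0 (c - 1)) (min (w - 1) (c + 1) + 1) 1).foldl (fun res nc =>
      if (nr, nc) = (r, c) then res else res ++ [(nr, nc)]) res) []

-- ===== PRECONDITION & SPEC =====
def Spec_get_neighbors_8 (r : Int) (c : Int) (h_ : Int) (w : Int) (out : List (Int × Int)) : Prop := out = get_neighbors_8_alt r c h_ w
instance (r : Int) (c : Int) (h_ : Int) (w : Int) (out : List (Int × Int)) : Decidable (Spec_get_neighbors_8 r c h_ w out) := by unfold Spec_get_neighbors_8; infer_instance

-- ===== CLAIM (what is proved, stated in full; the proofs are below) =====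
def Claim_equal_get_neighbors_8 : Prop := ∀ (r : Int) (c : Int) (h_ : Int) (w : Int), Dom_get_neighbors_8 r c h_ w → Spec_get_neighbors_8 r c h_ w (get_neighbors_8 r c h_ w)

-- ===== LEMMAS AND PROOFS =====

-- B's clamped row range equals the in-bounds filter of the three candidate rows
-- (same for columns): both are strictly increasing, nodup, and have the same members.
theorem pv_range_filter (a m : Int) :
    PySem.List.pyRange (max 0 (a - 1)) (min (m - 1) (a + 1) + 1) 1 =
      ([a - 1, a, a + 1] : List Int).filter (fun x => decide (0 ≤ x ∧ x < m)) := by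
  have hmem : ∀ x : Int,
      x ∈ PySem.List.pyRange (max 0 (a - 1)) (min (m - 1) (a + 1) + 1) 1 ↔
      x ∈ ([a - 1, a, a + 1] : List Int).filter (fun x => decide (0 ≤ x ∧ x < m)) := by
    intro x
    rw [PySem.List.mem_pyRange_one]
    simp only [List.mem_filter, List.mem_cons, List.not_mem_nil, or_false,
      decide_eq_true_eq]
    omega
  have hnd2 : (([a - 1, a, a + 1] : List Int).filter
      (fun x => decide (0 ≤ x ∧ x < m))).Nodup :=
    List.Nodup.filter _ (by simp; omega)
  have hsorted : (([a - 1, a, a + 1] : List Int).filter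
      (fun x => decide (0 ≤ x ∧ x < m))).Pairwise (· < ·) :=
    List.Pairwise.sublist (List.filter_sublist) (by
      refine List.pairwise_cons.mpr ⟨?_, List.pairwise_cons.mpr ⟨?_, List.pairwise_singleton _ _⟩⟩ <;>
        intro y hy <;> simp only [List.mem_cons, List.not_mem_nil, or_false] at hy
      · rcases hy with rfl | rfl <;> omega
      · rcases hy with rfl; omega)
  exact List.Perm.eq_of_pairwise (fun x y _ _ h1 h2 => by omega)
    (PySem.List.pairwise_lt_pyRange_one _ _) hsorted
    ((List.perm_ext_iff_of_nodup (PySem.List.nodup_pyRange_one _ _) hnd2).mpr hmem)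

-- B's inner column loop, as an append of a filterMap.
theorem pv_inner (r c nr : Int) (ys : List Int) (acc : List (Int × Int)) :
    ys.foldl (fun res nc => if (nr, nc) = (r, c) then res else res ++ [(nr, nc)]) acc =
      acc ++ ys.filterMap (fun nc => if (nr, nc) = (r, c) then none else some (nr, nc)) := by
  induction ys generalizing acc with
  | nil => simp
  | cons y ys ih =>
    rw [List.foldl_cons]
    by_cases h : (nr, y) = (r, c)
    · rw [if_pos h, ih, List.filterMap_cons_none (by simp [h])]
    · rw [if_neg h, ih, List.filterMap_cons_some (b := (nr, y)) (by simp [h]),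
        List.append_cons, List.append_assoc]
      simp

-- B's nested loop, as a flatMap over the row candidates.
theorem pv_outer (r c : Int) (xs ys : List Int) (acc : List (Int × Int)) :
    xs.foldl (fun res nr =>
        ys.foldl (fun res nc => if (nr, nc) = (r, c) then res else res ++ [(nr, nc)]) res) acc =
      acc ++ xs.flatMap (fun nr =>
        ys.filterMap (fun nc => if (nr, nc) = (r, c) then none else some (nr, nc))) := by
  induction xs generalizing acc with
  | nil => simp
  | cons x xs ih =>
    rw [List.foldl_cons, pv_inner, ih, List.flatMap_cons, List.append_assoc]

-- Abstract core: A's fold over the 8 candidate cells equals the product-of-filters form,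
-- for any in-bounds predicates P (rows) and Q (columns), provided the non-center
-- candidates really differ from the center coordinates.
theorem pv_key (P Q : Int → Prop) [DecidablePred P] [DecidablePred Q]
    (x1 x2 x3 y1 y2 y3 : Int)
    (hx1 : x1 ≠ x2) (hx3 : x3 ≠ x2) (hy1 : y1 ≠ y2) (hy3 : y3 ≠ y2) :
    ([(x1, y1), (x1, y2), (x1, y3), (x2, y1), (x2, y3), (x3, y1), (x3, y2), (x3, y3)] :
        List (Int × Int)).foldl
      (fun res d => if P d.1 ∧ Q d.2 then res ++ [d] else res) [] =
    (([x1, x2, x3] : List Int).filter (fun x => decide (P x))).flatMap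
      (fun nr => (([y1, y2, y3] : List Int).filter (fun y => decide (Q y))).filterMap
        (fun nc => if (nr, nc) = (x2, y2) then none else some (nr, nc))) := by
  by_cases h1 : P x1 <;> by_cases h2 : P x2 <;> by_cases h3 : P x3 <;>
  by_cases g1 : Q y1 <;> by_cases g2 : Q y2 <;> by_cases g3 : Q y3 <;>
  simp [h1, h2, h3, g1, g2, g3, hx1, hx3, hy1, hy3, List.foldl, List.filter,
    List.flatMap, List.filterMap, Prod.ext_iff]

theorem pv_add_neg_one (x : Int) : x + (-1) = x - 1 := by ring

theorem get_neighbors_8_eq (r c h_ w : Int) :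
    get_neighbors_8 r c h_ w = get_neighbors_8_alt r c h_ w := by
  have h := pv_key (fun x => 0 ≤ x ∧ x < h_) (fun y => 0 ≤ y ∧ y < w)
    (r - 1) r (r + 1) (c - 1) c (c + 1)
    (by omega) (by omega) (by omega) (by omega)
  calc get_neighbors_8 r c h_ w
      = ([(r - 1, c - 1), (r - 1, c), (r - 1, c + 1), (r, c - 1), (r, c + 1),
          (r + 1, c - 1), (r + 1, c), (r + 1, c + 1)] : List (Int × Int)).foldl
          (fun res d => if (0 ≤ d.1 ∧ d.1 < h_) ∧ (0 ≤ d.2 ∧ d.2 < w) then res ++ [d] else res)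
          [] := by
        simp [get_neighbors_8, List.foldl, pv_add_neg_one]
    _ = get_neighbors_8_alt r c h_ w := by
        rw [h]
        unfold get_neighbors_8_alt
        rw [pv_range_filter r h_, pv_range_filter c w, pv_outer]
        simp

-- ===== VERDICT (by name: the statement is the Claim_ definition above) =====
theorem get_neighbors_8_spec : Claim_equal_get_neighbors_8 := by
  intro r c h_ w _
  exact get_neighbors_8_eq r c h_ w
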